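-- pv_equiv track=rewrite | github.com/svvollmer/RRorbicella_angsd | workflow/scripts/create_nonrepeat_bed.py | find_uppercase_regions
-- ===== SOURCE A (Python) =====
-- def find_uppercase_regions(sequence, min_length=100):
--     """
--     Find runs of uppercase (non-repeat) bases.
--
--     Returns list of (start, end) tuples (0-based, half-open).
--     min_length: minimum region size to report (bp)
--     """
--     regions = []
--     in_upper = False
--     start = 0
--
--     for i, base in enumerate(sequence):
--         if base.isupper():
--             if not in_upper:
--                 start = i
--                 in_upper = True
--         else:
--             if in_upper:
--                 length = i - start
--                 if length >= min_length:
--                     regions.append((start, i))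
--                 in_upper = False
--
--     # Handle case where sequence ends in uppercase
--     if in_upper:
--         length = len(sequence) - start
--         if length >= min_length:
--             regions.append((start, len(sequence)))
--
--     return regions
-- ===== SOURCE B (Python) =====
-- def find_uppercase_regions(sequence, min_length=100):
--     """
--     Find runs of uppercase (non-repeat) bases.
--
--     Returns list of (start, end) tuples (0-based, half-open).
--     min_length: minimum region size to report (bp)
--     """
--     regions = []
--     n = len(sequence)
--     pos = 0
--     while pos < n:
--         k = sequence[pos].isupper()
--         end = pos + 1
--         while end < n and sequence[end].isupper() == k:
--             end += 1
--         if k and end - pos >= min_length: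
--             regions.append((pos, end))
--         pos = end
--     return regions
-- ===== Notes on version B (the rewrite author's own statement) =====
-- stated objective: alternative
-- what changed: Replaces A's in_upper/start state machine (with separate end-of-sequence tail handling) by splitting the sequence into maximal same-case runs with an inner scan and reporting each uppercase run of sufficient length directly.
import Mathlib
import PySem

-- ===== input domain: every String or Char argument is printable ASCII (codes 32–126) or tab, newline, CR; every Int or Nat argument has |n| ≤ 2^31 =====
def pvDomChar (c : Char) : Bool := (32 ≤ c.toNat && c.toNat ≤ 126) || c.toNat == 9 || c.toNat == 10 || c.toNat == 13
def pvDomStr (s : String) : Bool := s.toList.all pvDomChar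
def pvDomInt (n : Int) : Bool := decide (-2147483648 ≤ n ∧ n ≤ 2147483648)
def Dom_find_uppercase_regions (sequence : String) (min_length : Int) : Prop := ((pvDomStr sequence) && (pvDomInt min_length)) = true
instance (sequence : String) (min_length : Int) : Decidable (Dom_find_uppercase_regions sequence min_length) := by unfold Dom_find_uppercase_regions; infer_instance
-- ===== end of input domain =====

-- B replaces A's in_upper/start state machine (and its end-of-sequence tail handling)
-- by splitting the sequence into maximal same-case runs and reporting each long uppercase run directly.


-- ===== PORT A =====
-- the for-loop of A over enumerate(sequence), state (regions, in_upper, start)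
def pvLoopA (min_length : Int) : List (Int × Char) → List (Int × Int) × Bool × Int → List (Int × Int) × Bool × Int
  | [], st => st
  | (i, base) :: rest, (regions, in_upper, start) =>
    pvLoopA min_length rest
      (if PySem.Chars.isupper base then
        (if !in_upper then (regions, true, i) else (regions, in_upper, start))
      else
        (if in_upper then
          ((if i - start ≥ min_length then regions ++ [(start, i)] else regions), false, start)
        else (regions, in_upper, start)))

def find_uppercase_regions (sequence : String) (min_length : Int) : List (Int × Int) :=
  match pvLoopA min_length (PySem.List.enumerate sequence.toList 0) ([], false, 0) with
  | (regions, in_upper, start) =>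
    if in_upper then
      (if PySem.Str.len sequence - start ≥ min_length then regions ++ [(start, PySem.Str.len sequence)] else regions)
    else regions

-- ===== PORT B =====
-- Source B's outer while loop: peel one maximal same-case run per step (inner scan = takeWhile/dropWhile)
def pvRunsB (min_length : Int) : List Char → Int → List (Int × Int)
  | [], _ => []
  | c :: rest, pos =>
    let k := PySem.Chars.isupper c
    let run := rest.takeWhile (fun d => PySem.Chars.isupper d == k)
    let L : Int := (run.length : Int) + 1
    let tail := pvRunsB min_length (rest.dropWhile (fun d => PySem.Chars.isupper d == k)) (pos + L)
    if k && decide (L ≥ min_length) then (pos, pos + L) :: tail else tail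
termination_by cs => cs.length
decreasing_by
  simpa using Nat.lt_succ_of_le (List.length_dropWhile_le _ _)

def find_uppercase_regions_alt (sequence : String) (min_length : Int) : List (Int × Int) :=
  pvRunsB min_length sequence.toList 0

-- ===== PRECONDITION & SPEC =====
def Spec_find_uppercase_regions (sequence : String) (min_length : Int) (out : List (Int × Int)) : Prop := out = find_uppercase_regions_alt sequence min_length
instance (sequence : String) (min_length : Int) (out : List (Int × Int)) : Decidable (Spec_find_uppercase_regions sequence min_length out) := by unfold Spec_find_uppercase_regions; infer_instance

-- ===== CLAIM (what is proved, stated in full; the proofs are below) =====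
def Claim_equal_find_uppercase_regions : Prop := ∀ (sequence : String) (min_length : Int), Dom_find_uppercase_regions sequence min_length → Spec_find_uppercase_regions sequence min_length (find_uppercase_regions sequence min_length)

-- ===== LEMMAS AND PROOFS =====

-- the end-of-loop tail handling of A, as a function of the final state
def pvFinish (min_length N : Int) (st : List (Int × Int) × Bool × Int) : List (Int × Int) :=
  match st with
  | (regions, in_upper, start) =>
    if in_upper then
      (if N - start ≥ min_length then regions ++ [(start, N)] else regions)
    else regions

-- skipping a block of non-uppercase chars with in_upper = false leaves the state unchanged
theorem pvLoopA_skip_lower (ml : Int) (run : List Char) (h : ∀ d ∈ run, PySem.Chars.isupper d = false) :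
    ∀ (n : Int) (tl : List (Int × Char)) (r : List (Int × Int)) (s : Int),
      pvLoopA ml (PySem.List.enumerate run n ++ tl) (r, false, s) = pvLoopA ml tl (r, false, s) := by
  induction run with
  | nil => intro n tl r s; simp [PySem.List.enumerate]
  | cons c cs ih =>
    intro n tl r s
    have hc : PySem.Chars.isupper c = false := h c (by simp)
    rw [PySem.List.enumerate_cons]
    simp only [List.cons_append, pvLoopA, hc]
    simpa using ih (fun d hd => h d (by simp [hd])) (n + 1) tl r s

-- skipping a block of uppercase chars with in_upper = true leaves the state unchanged
theorem pvLoopA_skip_upper (ml : Int) (run : List Char) (h : ∀ d ∈ run, PySem.Chars.isupper d = true) :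
    ∀ (n : Int) (tl : List (Int × Char)) (r : List (Int × Int)) (s : Int),
      pvLoopA ml (PySem.List.enumerate run n ++ tl) (r, true, s) = pvLoopA ml tl (r, true, s) := by
  induction run with
  | nil => intro n tl r s; simp [PySem.List.enumerate]
  | cons c cs ih =>
    intro n tl r s
    have hc : PySem.Chars.isupper c = true := h c (by simp)
    rw [PySem.List.enumerate_cons]
    simp only [List.cons_append, pvLoopA, hc]
    simpa using ih (fun d hd => h d (by simp [hd])) (n + 1) tl r s

-- a run-splitting step starting at a non-uppercase char just advances the position
theorem pvRunsB_cons_lower (ml : Int) (d : Char) (xs : List Char) (p : Int)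
    (hd : PySem.Chars.isupper d = false) :
    pvRunsB ml (d :: xs) p = pvRunsB ml xs (p + 1) := by
  cases xs with
  | nil => simp [pvRunsB, hd]
  | cons e ys =>
    by_cases he : PySem.Chars.isupper e = false
    · rw [pvRunsB, pvRunsB]
      simp only [hd, he, List.takeWhile_cons, List.dropWhile_cons]
      simp only [Bool.false_and, beq_self_eq_true, if_true, List.length_cons,
        Bool.false_eq_true, if_false]
      push_cast
      ring_nf
    · have he' : PySem.Chars.isupper e = true := by revert he; cases PySem.Chars.isupper e <;> simp
      rw [pvRunsB]
      simp only [hd, he', List.takeWhile_cons, List.dropWhile_cons]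
      simp

-- heads produced by dropWhile falsify the predicate
theorem pv_dropWhile_head {α : Type} (p : α → Bool) :
    ∀ (l : List α) (x : α) (xs : List α), l.dropWhile p = x :: xs → p x = false := by
  intro l
  induction l with
  | nil => intro x xs h; simp [List.dropWhile] at h
  | cons a as ih =>
    intro x xs h
    by_cases ha : p a = true
    · exact ih x xs (by simpa [List.dropWhile, ha] using h)
    · rw [List.dropWhile_cons_of_neg ha] at h
      cases h
      simpa using ha

-- main invariant: running A's loop (then its tail handling) from a fresh state agrees with B's run recursion
theorem pv_main (ml : Int) : ∀ (N : Nat) (cs : List Char), cs.length ≤ N →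
    ∀ (n : Int) (r : List (Int × Int)) (s : Int),
    pvFinish ml (n + cs.length) (pvLoopA ml (PySem.List.enumerate cs n) (r, false, s)) =
      r ++ pvRunsB ml cs n := by
  intro N
  induction N with
  | zero =>
    intro cs h n r s
    have hcs : cs = [] := List.length_eq_zero_iff.mp (Nat.le_zero.mp h)
    subst hcs
    simp [PySem.List.enumerate, pvLoopA, pvRunsB, pvFinish]
  | succ N ih =>
    intro cs h n r s
    cases cs with
    | nil => simp [PySem.List.enumerate, pvLoopA, pvRunsB, pvFinish]
    | cons c rest =>
      have hrest : rest.length ≤ N := by simpa using h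
      rw [PySem.List.enumerate_cons, pvRunsB]
      cases hk : PySem.Chars.isupper c with
      | false =>
        -- first group is non-uppercase: A skips it with state unchanged, B emits nothing
        set run := rest.takeWhile (fun d => PySem.Chars.isupper d == false) with hrun
        set dr := rest.dropWhile (fun d => PySem.Chars.isupper d == false) with hdr
        have hsplit : run ++ dr = rest := List.takeWhile_append_dropWhile
        have hupr : ∀ d ∈ run, PySem.Chars.isupper d = false := by
          intro d hd
          simpa using List.mem_takeWhile_imp hd
        have hlen : dr.length ≤ N := le_trans (by
          simpa [hdr] using List.length_dropWhile_le (fun d => PySem.Chars.isupper d == false) rest) hrest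
        simp only [pvLoopA, hk, Bool.false_eq_true, if_false]
        rw [← hsplit, PySem.List.enumerate_append, pvLoopA_skip_lower ml run hupr]
        have harith : n + ((c :: (run ++ dr)).length : Int) = (n + 1 + run.length) + dr.length := by
          push_cast [List.length_cons, List.length_append]; ring
        rw [harith, ih dr hlen (n + 1 + run.length) r s]
        simp only [Bool.false_and, Bool.false_eq_true, if_false]
        have : n + ((run.length : Int) + 1) = n + 1 + run.length := by ring
        rw [this]
      | true =>
        -- first group is uppercase: A opens a run at n, B reports it iff long enough
        set run := rest.takeWhile (fun d => PySem.Chars.isupper d == true) with hrun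
        set dr := rest.dropWhile (fun d => PySem.Chars.isupper d == true) with hdr
        have hsplit : run ++ dr = rest := List.takeWhile_append_dropWhile
        have hupr : ∀ d ∈ run, PySem.Chars.isupper d = true := by
          intro d hd
          simpa using List.mem_takeWhile_imp hd
        have hdrlen : dr.length ≤ rest.length := by
          simpa [hdr] using List.length_dropWhile_le (fun d => PySem.Chars.isupper d == true) rest
        simp only [pvLoopA, hk, Bool.not_false, if_true]
        rw [← hsplit, PySem.List.enumerate_append, pvLoopA_skip_upper ml run hupr]
        cases hdrc : dr with
        | nil =>
          -- sequence ends inside the uppercase run: A's tail handling closes it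
          simp only [PySem.List.enumerate, pvLoopA, pvRunsB]
          have key : n + ((c :: (run ++ ([] : List Char))).length : Int) = n + ((run.length : Int) + 1) := by
            push_cast [List.length_cons, List.length_append, List.length_nil]; ring
          rw [key]
          by_cases hml : (run.length : Int) + 1 ≥ ml
          · have h1 : n + ((run.length : Int) + 1) - n ≥ ml := by omega
            simp [pvFinish, hml]
          · have h1 : ¬ (n + ((run.length : Int) + 1) - n ≥ ml) := by omega
            simp [pvFinish, hml]
        | cons d ys =>
          -- the char after the run closes it; then continue on the remainder
          have hd : PySem.Chars.isupper d = false := by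
            have := pv_dropWhile_head (fun d => PySem.Chars.isupper d == true) rest d ys (by rw [← hdr, hdrc])
            simpa using this
          have hys : ys.length ≤ N := by
            have h2 : (d :: ys).length ≤ rest.length := by rw [← hdrc]; exact hdrlen
            simp only [List.length_cons] at h2; omega
          rw [PySem.List.enumerate_cons]
          simp only [pvLoopA, hd, Bool.false_eq_true, if_false, if_true]
          have harith : n + ((c :: (run ++ d :: ys)).length : Int) = (n + 1 + run.length + 1) + ys.length := by
            push_cast [List.length_cons, List.length_append]; ring
          rw [harith, ih ys hys (n + 1 + run.length + 1) _ n]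
          rw [pvRunsB_cons_lower ml d ys (n + ((run.length : Int) + 1)) hd]
          simp only [Bool.true_and]
          have e1 : n + ((run.length : Int) + 1) + 1 = n + 1 + run.length + 1 := by ring
          have e2 : n + 1 + (run.length : Int) - n = (run.length : Int) + 1 := by ring
          rw [e1]
          by_cases hml : (run.length : Int) + 1 ≥ ml
          · have h1 : n + 1 + (run.length : Int) - n ≥ ml := by omega
            simp only [hml, h1, if_true, decide_true]
            have : n + ((run.length : Int) + 1) = n + 1 + run.length := by ring
            rw [this]; simp
          · have h1 : ¬ (n + 1 + (run.length : Int) - n ≥ ml) := by omega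
            simp [hml, h1]

-- ===== VERDICT (by name: the statement is the Claim_ definition above) =====
theorem find_uppercase_regions_spec : Claim_equal_find_uppercase_regions := by
  intro sequence min_length _
  unfold Spec_find_uppercase_regions find_uppercase_regions find_uppercase_regions_alt
  have h := pv_main min_length sequence.toList.length sequence.toList le_rfl 0 [] 0
  simp only [zero_add] at h
  rw [show (PySem.Str.len sequence) = (sequence.toList.length : Int) from by
    simp [PySem.Str.len]]
  rw [← List.nil_append (pvRunsB min_length sequence.toList 0), ← h, pvFinish]
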